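-- pv_equiv track=rewrite | github.com/paiml/depyler | examples/hard_final_conc_atomic.py | spin_increment
-- ===== SOURCE A (Python) =====
-- def atomic_load(state: list[int], idx: int) -> int:
--     """Atomic load from state array."""
--     return state[idx]
--
-- def atomic_cas(state: list[int], idx: int, expected: int, desired: int) -> int:
--     """Compare-and-swap. Returns 1 if swapped, 0 if not."""
--     current: int = state[idx]
--     if current == expected:
--         state[idx] = desired
--         return 1
--     return 0
--
-- def spin_increment(state: list[int], idx: int, target: int) -> int:
--     """Spin until CAS succeeds to increment to target. Returns attempts needed."""
--     attempts: int = 0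
--     done: int = 0
--     while done == 0:
--         old: int = atomic_load(state, idx)
--         result: int = atomic_cas(state, idx, old, old + 1)
--         attempts = attempts + 1
--         if result == 1:
--             if state[idx] >= target:
--                 done = 1
--         if attempts > 1000:
--             done = 1
--     return attempts
-- ===== SOURCE B (Python) =====
-- def spin_increment(state: list[int], idx: int, target: int) -> int:
--     """Closed-form: one read, arithmetic for the attempt count, one write."""
--     v0 = state[idx]
--     attempts = min(max(1, target - v0), 1001)
--     state[idx] = v0 + attempts
--     return attempts
-- ===== Notes on version B (the rewrite author's own statement) =====
-- stated objective: simpler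
-- what changed: Replaces the spin loop (up to 1001 CAS iterations via atomic_load/atomic_cas helpers) with a closed-form attempt count min(max(1, target - state[idx]), 1001) and a single write.
import Mathlib
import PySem

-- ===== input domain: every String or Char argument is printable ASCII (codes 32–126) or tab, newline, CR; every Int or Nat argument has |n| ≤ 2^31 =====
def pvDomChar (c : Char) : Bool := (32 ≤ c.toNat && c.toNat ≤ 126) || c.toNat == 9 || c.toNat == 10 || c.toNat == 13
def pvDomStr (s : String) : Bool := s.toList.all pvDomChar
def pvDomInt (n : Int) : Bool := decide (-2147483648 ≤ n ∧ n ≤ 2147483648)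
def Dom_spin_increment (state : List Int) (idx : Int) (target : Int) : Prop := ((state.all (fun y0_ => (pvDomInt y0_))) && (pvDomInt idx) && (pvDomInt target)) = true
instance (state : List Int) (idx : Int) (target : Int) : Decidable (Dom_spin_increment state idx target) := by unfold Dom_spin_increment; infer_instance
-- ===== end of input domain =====

-- B replaces A's CAS spin loop by the closed-form attempt count min(max(1, target - state[idx]), 1001);
-- both Pythons mutate state[idx] identically, the equivalence proved here is about the RETURN value.

-- ===== PORT A =====
def pv_atomic_load (state : List Int) (idx : Int) : Int :=
  PySem.List.pyGetD state idx 0   -- state[idx]; total form, exact under Pre_ (InRange)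

def pv_atomic_cas (state : List Int) (idx expected desired : Int) : Int × List Int :=
  let current := PySem.List.pyGetD state idx 0
  if current = expected then (1, PySem.List.pySetD state idx desired) else (0, state)

-- the while loop; fuel 1002 is a pure totality guard (the loop stops once attempts > 1000)
def pv_spin_loop (idx target : Int) : Nat → List Int → Int → Int
  | 0, _, attempts => attempts
  | fuel+1, state, attempts =>
    let old := pv_atomic_load state idx
    let r := pv_atomic_cas state idx old (old + 1)
    let attempts := attempts + 1
    let done : Int := if r.1 = 1 ∧ target ≤ PySem.List.pyGetD r.2 idx 0 then 1 else 0
    let done : Int := if attempts > 1000 then 1 else done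
    if done = 0 then pv_spin_loop idx target fuel r.2 attempts else attempts

def spin_increment (state : List Int) (idx : Int) (target : Int) : Int :=
  pv_spin_loop idx target 1002 state 0

-- ===== PORT B =====
def spin_increment_alt (state : List Int) (idx : Int) (target : Int) : Int :=
  let v0 := PySem.List.pyGetD state idx 0
  min (max 1 (target - v0)) 1001

-- ===== PRECONDITION & SPEC =====
-- Pre_ excludes exactly the out-of-range indices, on which Python's state[idx] raises IndexError.
def Pre_spin_increment (state : List Int) (idx : Int) (target : Int) : Prop :=
  PySem.Raise.InRange state.length idx
instance (state : List Int) (idx : Int) (target : Int) : Decidable (Pre_spin_increment state idx target) := by unfold Pre_spin_increment; infer_instance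

def pvWitness_spin_increment : List Int × Int × Int := ([0, 5], 1, 9)

def Spec_spin_increment (state : List Int) (idx : Int) (target : Int) (out : Int) : Prop := out = spin_increment_alt state idx target
instance (state : List Int) (idx : Int) (target : Int) (out : Int) : Decidable (Spec_spin_increment state idx target out) := by unfold Spec_spin_increment; infer_instance

-- ===== CLAIM (what is proved, stated in full; the proofs are below) =====
def Claim_equal_spin_increment : Prop := ∀ (state : List Int) (idx : Int) (target : Int), Dom_spin_increment state idx target → Pre_spin_increment state idx target → Spec_spin_increment state idx target (spin_increment state idx target)

-- ===== LEMMAS AND PROOFS =====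

-- reading back the just-written cell gives the written value (any in-range index, incl. negative)
theorem pv_getD_setD_self (xs : List Int) (i v d : Int)
    (h : PySem.Raise.InRange xs.length i) :
    PySem.List.pyGetD (PySem.List.pySetD xs i v) i d = v := by
  obtain ⟨h1, h2⟩ := h
  obtain ⟨k, hk, hklt⟩ : ∃ k, PySem.List.pyIdx? xs.length i = some k ∧ k < xs.length := by
    unfold PySem.List.pyIdx?
    by_cases h0 : 0 ≤ i
    · exact ⟨i.toNat, by simp [h0]; omega, by omega⟩
    · exact ⟨xs.length - (-i).toNat, by simp [h0]; omega, by omega⟩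
  simp [PySem.List.pyGetD, PySem.List.pyGet?, PySem.List.pySetD, PySem.List.pySet?, hk,
    hklt]

theorem pv_loop_closed (idx target : Int) :
    ∀ (fuel : Nat) (st : List Int) (attempts : Int),
      PySem.Raise.InRange st.length idx →
      0 ≤ attempts → attempts ≤ 1000 →
      (1001 : Int) ≤ (fuel : Int) + attempts →
      pv_spin_loop idx target fuel st attempts
        = min (max (attempts + 1) (target - PySem.List.pyGetD st idx 0 + attempts)) 1001 := by
  intro fuel
  induction fuel with
  | zero =>
    intro st a _ _ _ h2
    exfalso; simp at h2; omega
  | succ n ih =>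
    intro st a h h0 h1 h2
    unfold pv_spin_loop pv_atomic_load pv_atomic_cas
    have hset := pv_getD_setD_self st idx (PySem.List.pyGetD st idx 0 + 1) 0 ⟨h.1, h.2⟩
    have hlen : (PySem.List.pySetD st idx (PySem.List.pyGetD st idx 0 + 1)).length = st.length :=
      PySem.List.length_pySetD ..
    dsimp only
    rw [if_pos rfl]
    dsimp only
    rw [hset]
    by_cases hdone1 : (1 : Int) = 1 ∧ target ≤ PySem.List.pyGetD st idx 0 + 1
    · rw [if_pos hdone1]
      by_cases hcap : a + 1 > 1000
      · rw [if_pos hcap, if_neg (by omega)]; omega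
      · rw [if_neg hcap, if_neg (by omega)]; omega
    · rw [if_neg hdone1]
      by_cases hcap : a + 1 > 1000
      · rw [if_pos hcap, if_neg (by omega)]
        have : target - PySem.List.pyGetD st idx 0 + a ≥ a + 2 := by omega
        omega
      · rw [if_neg hcap, if_pos rfl]
        rw [ih (PySem.List.pySetD st idx (PySem.List.pyGetD st idx 0 + 1)) (a + 1)
          (by rw [hlen]; exact h) (by omega) (by omega) (by push_cast at h2 ⊢; omega)]
        rw [hset]
        omega

-- ===== VERDICT (by name: the statement is the Claim_ definition above) =====
theorem spin_increment_spec : Claim_equal_spin_increment := by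
  intro state idx target _ hpre
  unfold Spec_spin_increment spin_increment spin_increment_alt
  rw [pv_loop_closed idx target 1002 state 0 hpre (by omega) (by omega) (by norm_num)]
  dsimp only
  omega
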